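-- pv_equiv track=rewrite | github.com/asatwik218/speed-coding | Speed-Coding/Questions/__innit__.py | trueorfalse
-- ===== SOURCE A (Python) =====
-- def trueorfalse(integer):
--     r=0
--     n=integer
--     while(integer !=0):
--         d=integer%10
--         integer=integer//10
--         r=r*10+d
--     f=0
--     f1=0
--     for i in range(2,n):
--         if n%i == 0:
--             f=1
--             break
--
--     for i in range(2,r):
--         if r%i == 0:
--             f1=1
--             break
--     if(f==0 and f1==0):
--         return 1
--     else:
--         return 0
-- ===== SOURCE B (Python) =====
-- def trueorfalse(integer):
--     def has_small_factor(n):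
--         i = 2
--         while i * i <= n:
--             if n % i == 0:
--                 return True
--             i += 1
--         return False
--     r = 0
--     m = integer
--     while m > 0:
--         r = r * 10 + m % 10
--         m //= 10
--     return 0 if has_small_factor(integer) or has_small_factor(r) else 1
-- ===== Notes on version B (the rewrite author's own statement) =====
-- stated objective: faster
-- what changed: Each trial-division scan runs only while i*i <= n instead of over the whole range(2, n), and the two flag loops collapse into one boolean helper applied to n and its reverse.
import Mathlib
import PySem

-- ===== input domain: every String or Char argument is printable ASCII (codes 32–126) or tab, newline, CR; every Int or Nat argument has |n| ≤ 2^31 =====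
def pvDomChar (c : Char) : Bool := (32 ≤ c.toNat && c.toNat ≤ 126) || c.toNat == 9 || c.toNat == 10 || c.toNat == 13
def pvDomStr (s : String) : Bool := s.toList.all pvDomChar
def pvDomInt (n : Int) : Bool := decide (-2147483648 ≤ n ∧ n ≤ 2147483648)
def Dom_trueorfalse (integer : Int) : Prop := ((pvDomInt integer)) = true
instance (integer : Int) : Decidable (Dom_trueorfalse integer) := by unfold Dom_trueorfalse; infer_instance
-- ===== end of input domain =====

-- B replaces A's full trial division up to n by trial division only up to sqrt(n) (while i*i <= n), an asymptotic speed-up; the digit-reversal loop is the same arithmetic.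

-- ===== PORT A =====
-- A's while-loop reversing the digits; the '0 < integer' guard only makes the
-- recursion total (Python's 'integer != 0' loop never terminates for negative input,
-- which Pre_ excludes; for integer ≥ 0 the conditions coincide).
def pvRevA (integer r : Int) : Int :=
  if h : 0 < integer then
    pvRevA (PySem.Int.floordiv integer 10) (r * 10 + PySem.Int.mod integer 10)
  else r
termination_by integer.toNat
decreasing_by
  have h10 : PySem.Int.floordiv integer 10 = integer / 10 :=
    PySem.Int.floordiv_eq_ediv_of_pos (by omega)
  rw [h10]; omega

-- A's 'for i in range(2, n): if n % i == 0: f = 1; break' loop, flag returned.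
def pvScanA (n : Int) : List Int → Int
  | [] => 0
  | i :: t => if PySem.Int.mod n i = 0 then 1 else pvScanA n t

def trueorfalse (integer : Int) : Int :=
  let n := integer
  let r := pvRevA integer 0
  let f := pvScanA n (PySem.List.pyRange 2 n 1)
  let f1 := pvScanA r (PySem.List.pyRange 2 r 1)
  if f = 0 ∧ f1 = 0 then 1 else 0

-- ===== PORT B =====
-- B's 'while i * i <= n' trial-division helper (i is the Python loop counter, always ≥ 2 ≥ 0, so Nat).
def pvHasSmallFactor (n : Int) (i : Nat) : Bool :=
  if h : (i : Int) * (i : Int) ≤ n then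
    (if PySem.Int.mod n (i : Int) = 0 then true else pvHasSmallFactor n (i + 1))
  else false
termination_by n.toNat + 1 - i
decreasing_by
  have hi : (i : Int) ≤ n := by nlinarith [h]
  omega

def pvRevB (m r : Int) : Int :=
  if h : 0 < m then
    pvRevB (PySem.Int.floordiv m 10) (r * 10 + PySem.Int.mod m 10)
  else r
termination_by m.toNat
decreasing_by
  have h10 : PySem.Int.floordiv m 10 = m / 10 :=
    PySem.Int.floordiv_eq_ediv_of_pos (by omega)
  rw [h10]; omega

def trueorfalse_alt (integer : Int) : Int :=
  let r := pvRevB integer 0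
  if pvHasSmallFactor integer 2 || pvHasSmallFactor r 2 then 0 else 1

-- ===== PRECONDITION & SPEC =====
-- Pre_ excludes negative input, on which A's 'while integer != 0' loop diverges
-- (Python floor division never drives a negative number to 0).
def Pre_trueorfalse (integer : Int) : Prop := 0 ≤ integer
instance (integer : Int) : Decidable (Pre_trueorfalse integer) := by unfold Pre_trueorfalse; infer_instance
def pvWitness_trueorfalse : Int := (13)

def Spec_trueorfalse (integer : Int) (out : Int) : Prop := out = trueorfalse_alt integer
instance (integer : Int) (out : Int) : Decidable (Spec_trueorfalse integer out) := by unfold Spec_trueorfalse; infer_instance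

-- ===== CLAIM (what is proved, stated in full; the proofs are below) =====
def Claim_equal_trueorfalse : Prop := ∀ (integer : Int), Dom_trueorfalse integer → Pre_trueorfalse integer → Spec_trueorfalse integer (trueorfalse integer)

-- ===== LEMMAS AND PROOFS =====

-- the two digit-reversal loops are the same recursion
theorem pvRev_eq (m r : Int) : pvRevA m r = pvRevB m r := by
  unfold pvRevA pvRevB
  split
  · exact pvRev_eq _ _
  · rfl
termination_by m.toNat
decreasing_by
  have h10 : PySem.Int.floordiv m 10 = m / 10 :=
    PySem.Int.floordiv_eq_ediv_of_pos (by omega)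
  rw [h10]; omega

theorem pvRev_nonneg (m r : Int) (_hm : 0 ≤ m) (hr : 0 ≤ r) : 0 ≤ pvRevA m r := by
  unfold pvRevA
  split
  · rename_i h
    apply pvRev_nonneg
    · have h10 : PySem.Int.floordiv m 10 = m / 10 :=
        PySem.Int.floordiv_eq_ediv_of_pos (by omega)
      rw [h10]; omega
    · have := PySem.Int.mod_nonneg m (b := 10) (by omega)
      nlinarith
  · exact hr
termination_by m.toNat
decreasing_by
  have h10 : PySem.Int.floordiv m 10 = m / 10 :=
    PySem.Int.floordiv_eq_ediv_of_pos (by omega)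
  rw [h10]; omega

theorem pvScanA_eq_zero_iff (n : Int) (l : List Int) :
    pvScanA n l = 0 ↔ ∀ i ∈ l, PySem.Int.mod n i ≠ 0 := by
  induction l with
  | nil => simp [pvScanA]
  | cons i t ih =>
    simp only [pvScanA, List.mem_cons]
    split
    · rename_i h
      constructor
      · intro hc; omega
      · intro hall; exact absurd h (hall i (Or.inl rfl))
    · rename_i h
      rw [ih]
      constructor
      · rintro hall j (rfl | hj)
        · exact h
        · exact hall j hj
      · intro hall j hj; exact hall j (Or.inr hj)

theorem pvHSF_false_iff_aux (fuel : Nat) : ∀ (n : Int) (i : Nat), n.toNat + 1 - i ≤ fuel →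
    (pvHasSmallFactor n i = false ↔
      ∀ j : Nat, i ≤ j → (j : Int) * (j : Int) ≤ n → PySem.Int.mod n (j : Int) ≠ 0) := by
  induction fuel with
  | zero =>
    intro n i hf
    have hin : n < (i : Int) := by
      have := Int.self_le_toNat n
      omega
    have hi1 : (1 : Int) ≤ (i : Int) := by omega
    have hnot : ¬ ((i : Int) * (i : Int) ≤ n) := by nlinarith
    rw [pvHasSmallFactor, dif_neg hnot]
    refine iff_of_true rfl ?_
    intro j hij hj2
    exfalso
    have hji : (i : Int) ≤ (j : Int) := by exact_mod_cast hij
    nlinarith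
  | succ f ih =>
    intro n i hf
    rw [pvHasSmallFactor]
    split
    · rename_i h
      split
      · rename_i hm
        constructor
        · intro hc; exact Bool.noConfusion hc
        · intro hall; exact absurd hm (hall i le_rfl h)
      · rename_i hm
        rw [ih n (i + 1) (by omega)]
        constructor
        · intro hall j hij hj2
          rcases Nat.eq_or_lt_of_le hij with rfl | hlt
          · exact hm
          · exact hall j hlt hj2
        · intro hall j hij hj2; exact hall j (by omega) hj2
    · rename_i hno
      simp only [true_iff]
      intro j hij hj2
      exfalso
      apply hno
      have hle : (i : Int) ≤ (j : Int) := by exact_mod_cast hij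
      nlinarith [Int.natCast_nonneg i, Int.natCast_nonneg j]

theorem pvHSF_false_iff (n : Int) (i : Nat) :
    pvHasSmallFactor n i = false ↔
      ∀ j : Nat, i ≤ j → (j : Int) * (j : Int) ≤ n → PySem.Int.mod n (j : Int) ≠ 0 :=
  pvHSF_false_iff_aux (n.toNat + 1 - i) n i le_rfl

-- the bridge: for 0 ≤ n, "no divisor in [2, n)" = "no divisor i ≥ 2 with i*i ≤ n"
theorem pvBridge (n : Int) (hn : 0 ≤ n) :
    (∀ i ∈ PySem.List.pyRange 2 n 1, PySem.Int.mod n i ≠ 0) ↔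
      (∀ j : Nat, 2 ≤ j → (j : Int) * (j : Int) ≤ n → PySem.Int.mod n (j : Int) ≠ 0) := by
  constructor
  · intro hall j hj2 hjsq
    have h2 : (2 : Int) ≤ (j : Int) := by exact_mod_cast hj2
    have hjn : (j : Int) < n := by nlinarith
    exact hall (j : Int) (by rw [PySem.List.mem_pyRange_one]; constructor <;> omega)
  · intro hall i hi
    rw [PySem.List.mem_pyRange_one] at hi
    obtain ⟨h2i, hin⟩ := hi
    intro hmod
    rw [PySem.Int.mod_eq_zero_iff_dvd] at hmod
    obtain ⟨k, hk⟩ := hmod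
    have hkpos : 1 < k := by nlinarith
    rcases le_total i k with hik | hki
    · refine hall i.toNat (by omega) ?_ ?_
      · have hc : ((i.toNat : Int)) = i := by omega
        rw [hc, hk]; nlinarith
      · have hc : ((i.toNat : Int)) = i := by omega
        rw [hc, PySem.Int.mod_eq_zero_iff_dvd]; exact ⟨k, hk⟩
    · refine hall k.toNat (by omega) ?_ ?_
      · have hc : ((k.toNat : Int)) = k := by omega
        rw [hc, hk]; nlinarith
      · have hc : ((k.toNat : Int)) = k := by omega
        rw [hc, PySem.Int.mod_eq_zero_iff_dvd]; exact ⟨i, by rw [hk]; ring⟩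

-- ===== VERDICT (by name: the statement is the Claim_ definition above) =====
theorem trueorfalse_spec : Claim_equal_trueorfalse := by
  intro integer _ hpre
  unfold Spec_trueorfalse trueorfalse trueorfalse_alt
  simp only [← pvRev_eq]
  have hrn : 0 ≤ pvRevA integer 0 := pvRev_nonneg integer 0 hpre le_rfl
  have h1 : (pvScanA integer (PySem.List.pyRange 2 integer 1) = 0) ↔
      pvHasSmallFactor integer 2 = false := by
    rw [pvScanA_eq_zero_iff, pvHSF_false_iff, pvBridge integer hpre]
  have h2 : (pvScanA (pvRevA integer 0) (PySem.List.pyRange 2 (pvRevA integer 0) 1) = 0) ↔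
      pvHasSmallFactor (pvRevA integer 0) 2 = false := by
    rw [pvScanA_eq_zero_iff, pvHSF_false_iff, pvBridge _ hrn]
  have key : (pvScanA integer (PySem.List.pyRange 2 integer 1) = 0 ∧
      pvScanA (pvRevA integer 0) (PySem.List.pyRange 2 (pvRevA integer 0) 1) = 0) ↔
      (pvHasSmallFactor integer 2 || pvHasSmallFactor (pvRevA integer 0) 2) = false := by
    rw [h1, h2, Bool.or_eq_false_iff]
  by_cases hc : pvScanA integer (PySem.List.pyRange 2 integer 1) = 0 ∧
      pvScanA (pvRevA integer 0) (PySem.List.pyRange 2 (pvRevA integer 0) 1) = 0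
  · rw [if_pos hc, key.mp hc]
    rfl
  · rw [if_neg hc]
    have hb : (pvHasSmallFactor integer 2 || pvHasSmallFactor (pvRevA integer 0) 2) = true := by
      rcases Bool.eq_false_or_eq_true
          (pvHasSmallFactor integer 2 || pvHasSmallFactor (pvRevA integer 0) 2) with ht | hf
      · exact ht
      · exact absurd (key.mpr hf) hc
    rw [hb]
    rfl
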